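-- pv_equiv track=rewrite | github.com/Chopinsky/algo-problems | challenges/3999/3671-sum-of-beautiful-subsequences.py | totalBeauty
-- ===== SOURCE A (Python) =====
-- from typing import List
-- from collections import defaultdict
--
-- class Fenwick:
--   def __init__(self, n: int):
--     self.a = [0] * (n+1)
--
--   def query(self, i: int) -> int:
--     s = 0 if i > 0 else self.a[i]
--
--     while i > 0:
--       s += self.a[i]
--       i -= i & -i
--
--     return s
--
--   def add(self, i: int, val: int):
--     if i == 0:
--       self.a[i] += val
--       return
--
--     while i < len(self.a):
--       self.a[i] += val
--       i += i & -i
--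
-- def totalBeauty(nums: List[int]) -> int:
--   mod = 10**9 + 7
--   m = max(nums) + 1
--   locs = defaultdict(list)
--
--   for i, val in enumerate(nums):
--     locs[val].append(i)
--
--   f = [0]*m
--   for d in range(1, m):
--     indices = sorted(i for v in range(d, m, d) for i in locs[v])
--     if len(indices) <= 1:
--       f[d] = len(indices)
--       continue
--
--     rank = {pos: r for r, pos in enumerate(indices, 1)}
--     fen = Fenwick(len(indices))
--
--     for v in range(d, m, d):
--       for pos in reversed(locs[v]):
--         r = rank[pos]
--         addend = 1 + fen.query(r-1)
--         f[d] += addend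
--         fen.add(r, addend)
--
--   for d in range(m-1, 0, -1):
--     for e in range(2*d, m, d):
--       f[d] -= f[e]
--
--     f[d] %= mod
--
--   return sum(d * f[d] for d in range(1, m)) % mod
-- ===== SOURCE B (Python) =====
-- from typing import List
--
-- def totalBeauty(nums: List[int]) -> int:
--   mod = 10**9 + 7
--   m = max(nums) + 1
--   f = [0] * m
--   for d in range(1, m):
--     # direct quadratic DP over positions in index order:
--     # dp(p) = 1 + sum of dp(q) over earlier positions q with value[q] < value[p],
--     # both values multiples of d
--     dp = []
--     total = 0
--     for val in nums:
--       if val > 0 and val % d == 0: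
--         c = 1 + sum(c0 for v0, c0 in dp if v0 < val)
--         dp.append((val, c))
--         total += c
--     f[d] = total
--   for d in range(m - 1, 0, -1):
--     for e in range(2 * d, m, d):
--       f[d] -= f[e]
--     f[d] %= mod
--   return sum(d * f[d] for d in range(1, m)) % mod
-- ===== Notes on version B (the rewrite author's own statement) =====
-- stated objective: simpler
-- what changed: The Fenwick tree, the locs dict, the sorted index list and the rank dict are all removed: for each divisor d a single in-order scan of nums computes dp(p) = 1 + sum of dp(q) over earlier positions with smaller value directly by a quadratic scan over the dp list; the Moebius phase and weighted sum are unchanged.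
import Mathlib
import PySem

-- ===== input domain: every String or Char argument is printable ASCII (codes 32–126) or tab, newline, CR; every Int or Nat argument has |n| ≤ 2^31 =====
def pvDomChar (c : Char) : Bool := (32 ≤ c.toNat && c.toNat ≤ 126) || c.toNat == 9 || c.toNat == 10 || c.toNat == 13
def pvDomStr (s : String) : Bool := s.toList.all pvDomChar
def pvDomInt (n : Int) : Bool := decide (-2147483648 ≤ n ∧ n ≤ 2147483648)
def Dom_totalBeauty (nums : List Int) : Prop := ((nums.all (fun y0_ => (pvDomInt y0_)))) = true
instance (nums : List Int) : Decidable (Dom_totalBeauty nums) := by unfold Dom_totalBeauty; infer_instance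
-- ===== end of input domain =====

-- B replaces A's per-divisor Fenwick-tree counting (locs dict + sorted index list + rank dict + BIT)
-- by a direct quadratic scan computing the same strictly-increasing-subsequence dp in index order;
-- the Möbius phase and the weighted sum are unchanged.  Objective: simpler (not faster).

-- ===== PORT A =====
-- lowbit: for i > 0, Python's  i & -i  is  i - (i & (i-1))  on i.toNat (these three lemmas are
-- cited by the ports' decreasing_by).
def pvLb (n : Nat) : Nat := n - (n &&& (n - 1))

theorem pvLb_pos {n : Nat} (h : 0 < n) : 0 < pvLb n := by
  have h2 : n &&& (n - 1) ≤ n - 1 := Nat.and_le_right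
  unfold pvLb; omega

theorem pvLb_le {n : Nat} : pvLb n ≤ n := Nat.sub_le _ _

theorem pvBand_neg (i : Int) (h : 0 < i) : PySem.Int.band i (-i) = ((pvLb i.toNat : Nat) : Int) := by
  unfold PySem.Int.band pvLb
  rw [if_pos (by omega), if_neg (by omega)]
  have h2 : (- -i - 1).toNat = i.toNat - 1 := by omega
  rw [h2]

-- Fenwick.query: 's = 0 if i > 0 else a[i]; while i > 0: s += a[i]; i -= i & -i'
-- (the in-range default 0 of pyGetD is never used: every access in A is in range)
def pvFenQueryLoop (a : List Int) (i s : Int) : Int :=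
  if h : 0 < i then
    pvFenQueryLoop a (i - PySem.Int.band i (-i)) (s + PySem.List.pyGetD a i 0)
  else s
termination_by i.toNat
decreasing_by
  rw [pvBand_neg i h]
  have h1 := pvLb_pos (n := i.toNat) (by omega)
  have h2 := pvLb_le (n := i.toNat)
  omega

def pvFenQuery (a : List Int) (i : Int) : Int :=
  if 0 < i then pvFenQueryLoop a i 0 else PySem.List.pyGetD a i 0

-- Fenwick.add: 'if i == 0: a[0] += val; return'  then  'while i < len(a): a[i] += val; i += i & -i'
-- ('0 < i' in the guard is a totality guard only: A always calls add with i ≥ 1, where it is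
-- Python's loop condition 'i < len(a)')
def pvFenAddLoop (a : List Int) (i val : Int) : List Int :=
  if h : 0 < i ∧ i < PySem.List.len a then
    pvFenAddLoop (PySem.List.pySetD a i (PySem.List.pyGetD a i 0 + val)) (i + PySem.Int.band i (-i)) val
  else a
termination_by (PySem.List.len a - i).toNat
decreasing_by
  rw [PySem.List.len_eq, PySem.List.length_pySetD, PySem.List.len_eq, pvBand_neg i h.1]
  rw [PySem.List.len_eq] at h
  have h1 := pvLb_pos (n := i.toNat) (by omega)
  omega

def pvFenAdd (a : List Int) (i val : Int) : List Int :=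
  if i = 0 then PySem.List.pySetD a i (PySem.List.pyGetD a i 0 + val)
  else pvFenAddLoop a i val

-- locs = defaultdict(list); for i, val in enumerate(nums): locs[val].append(i)
def pvLocs (nums : List Int) : PySem.Dict Int (List Int) :=
  (PySem.List.enumerate nums 0).foldl (fun d p => d.modify p.2 [] (· ++ [p.1])) PySem.Dict.empty

-- Python's list f is ported as a Lean Array (same values, updated in place); every access
-- f[d] / f[e] in A and B has 0 <= index < len(f), where these two helpers are exactly
-- Python's f[i] and f[i] = v.
def pvAGet (f : Array Int) (i : Int) : Int := f.getD i.toNat 0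

def pvASet (f : Array Int) (i : Int) (v : Int) : Array Int := f.setIfInBounds i.toNat v

-- body of A's loop 'for d in range(1, m)'
def pvStepA (locs : PySem.Dict Int (List Int)) (m : Int) (f : Array Int) (d : Int) : Array Int :=
  let indices := PySem.List.sorted
    ((PySem.List.pyRange d m d).foldl (fun acc v => acc ++ locs.getD v []) []) (fun x => x)
  if PySem.List.len indices ≤ 1 then
    pvASet f d (PySem.List.len indices)
  else
    let rank := (PySem.List.enumerate indices 1).foldl (fun r p => r.insert p.2 p.1) PySem.Dict.empty
    let res := (PySem.List.pyRange d m d).foldl (fun st v =>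
        (locs.getD v []).reverse.foldl (fun st pos =>
          let r := rank.getD pos 0
          let addend := 1 + pvFenQuery st.2 (r - 1)
          (st.1 + addend, pvFenAdd st.2 r addend)) st)
      (pvAGet f d, List.replicate (indices.length + 1) 0)
    pvASet f d res.1

-- phase 2 and phase 3 are textually identical in A and in B; both ports share these two helpers:
-- 'for d in range(m-1, 0, -1): for e in range(2*d, m, d): f[d] -= f[e]; f[d] %= mod'
def pvMoebius (m : Int) (f : Array Int) : Array Int :=
  (PySem.List.pyRange (m-1) 0 (-1)).foldl (fun f d =>
    let f := (PySem.List.pyRange (2*d) m d).foldl (fun f e =>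
        pvASet f d (pvAGet f d - pvAGet f e)) f
    pvASet f d (PySem.Int.mod (pvAGet f d) 1000000007)) f

-- 'return sum(d * f[d] for d in range(1, m)) % mod'
def pvWeightedSum (m : Int) (f : Array Int) : Int :=
  PySem.Int.mod ((PySem.List.pyRange 1 m 1).foldl (fun s d => s + d * pvAGet f d) 0) 1000000007

def totalBeauty (nums : List Int) : Int :=
  match PySem.List.max? nums (fun x => x) with
  | none => 0   -- max([]) raises ValueError: excluded by Pre_totalBeauty
  | some mx =>
    let m := mx + 1
    let f := (PySem.List.pyRange 1 m 1).foldl (pvStepA (pvLocs nums) m) (Array.replicate m.toNat 0)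
    pvWeightedSum m (pvMoebius m f)

-- ===== PORT B =====
-- body of B's loop 'for d in range(1, m)': one in-order scan of nums with the dp list
def pvStepB (nums : List Int) (f : Array Int) (d : Int) : Array Int :=
  let res := nums.foldl (fun st v =>
      if 0 < v ∧ PySem.Int.mod v d = 0 then
        let c := 1 + ((st.1.filter (fun p => p.1 < v)).map (fun p => p.2)).sum
        (st.1 ++ [(v, c)], st.2 + c)
      else st) (([] : List (Int × Int)), (0 : Int))
  pvASet f d res.2

def totalBeauty_alt (nums : List Int) : Int :=
  match PySem.List.max? nums (fun x => x) with
  | none => 0   -- max([]) raises ValueError: excluded by Pre_totalBeauty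
  | some mx =>
    let m := mx + 1
    let f := (PySem.List.pyRange 1 m 1).foldl (pvStepB nums) (Array.replicate m.toNat 0)
    pvWeightedSum m (pvMoebius m f)

-- ===== PRECONDITION & SPEC =====
-- Pre_ excludes only the empty list, on which A (and B) raise ValueError from max([]).
def Pre_totalBeauty (nums : List Int) : Prop := nums ≠ []
instance (nums : List Int) : Decidable (Pre_totalBeauty nums) := by unfold Pre_totalBeauty; infer_instance

def pvWitness_totalBeauty : List Int := [2, 4, 3]

def Spec_totalBeauty (nums : List Int) (out : Int) : Prop := out = totalBeauty_alt nums
instance (nums : List Int) (out : Int) : Decidable (Spec_totalBeauty nums out) := by unfold Spec_totalBeauty; infer_instance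

-- ===== CLAIM (what is proved, stated in full; the proofs are below) =====
def Claim_equal_totalBeauty : Prop := ∀ (nums : List Int), Dom_totalBeauty nums → Pre_totalBeauty nums → Spec_totalBeauty nums (totalBeauty nums)

-- ===== LEMMAS AND PROOFS =====

-- ===== LEMMAS AND PROOFS =====
theorem pvAnd1 (q : Nat) : (2*q+1) &&& (2*q) = 2*q := by
  apply Nat.eq_of_testBit_eq
  intro i
  cases i with
  | zero => simp [Nat.testBit_zero]
  | succ i =>
    rw [Nat.testBit_and]
    rw [show (2*q+1).testBit (i+1) = q.testBit i from by rw [Nat.testBit_add_one]; congr 1; omega]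
    rw [show (2*q).testBit (i+1) = q.testBit i from by rw [Nat.testBit_add_one]; congr 1; omega]
    simp

theorem pvAnd2 (q k : Nat) : (2*q) &&& (2*k+1) = 2*(q &&& k) := by
  apply Nat.eq_of_testBit_eq
  intro i
  cases i with
  | zero => simp [Nat.testBit_zero]
  | succ i =>
    rw [Nat.testBit_and]
    rw [show (2*q).testBit (i+1) = q.testBit i from by rw [Nat.testBit_add_one]; congr 1; omega]
    rw [show (2*k+1).testBit (i+1) = k.testBit i from by rw [Nat.testBit_add_one]; congr 1; omega]
    rw [show (2*(q&&&k)).testBit (i+1) = (q&&&k).testBit i from by rw [Nat.testBit_add_one]; congr 1; omega]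
    rw [Nat.testBit_and]

theorem pvLb_odd (q : Nat) : pvLb (2*q+1) = 1 := by
  unfold pvLb
  rw [show 2*q+1-1 = 2*q from by omega, pvAnd1]
  omega

theorem pvLb_even {q : Nat} (h : 0 < q) : pvLb (2*q) = 2 * pvLb q := by
  unfold pvLb
  rw [show 2*q-1 = 2*(q-1)+1 from by omega, pvAnd2]
  have h2 : q &&& (q - 1) ≤ q - 1 := Nat.and_le_right
  omega

theorem pvLb_dvd : ∀ n, 0 < n → pvLb n ∣ n := by
  intro n
  induction n using Nat.strong_induction_on with
  | _ n ih =>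
    intro hn
    rcases Nat.even_or_odd n with ⟨q, hq⟩ | ⟨q, hq⟩
    · subst hq
      rw [show q + q = 2*q from by omega, pvLb_even (by omega)]
      exact Nat.mul_dvd_mul_left 2 (ih q (by omega) (by omega))
    · subst hq
      rw [pvLb_odd]; exact Nat.one_dvd _

theorem pvLb_pow2 : ∀ n, 0 < n → ∃ u, pvLb n = 2^u := by
  intro n
  induction n using Nat.strong_induction_on with
  | _ n ih =>
    intro hn
    rcases Nat.even_or_odd n with ⟨q, hq⟩ | ⟨q, hq⟩
    · subst hq
      rw [show q + q = 2*q from by omega, pvLb_even (by omega)]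
      obtain ⟨u, hu⟩ := ih q (by omega) (by omega)
      exact ⟨u+1, by rw [hu]; ring⟩
    · subst hq
      rw [pvLb_odd]; exact ⟨0, rfl⟩

theorem pvLb_dvd_sub : ∀ n, 0 < n → 2 * pvLb n ∣ (n - pvLb n) := by
  intro n
  induction n using Nat.strong_induction_on with
  | _ n ih =>
    intro hn
    rcases Nat.even_or_odd n with ⟨q, hq⟩ | ⟨q, hq⟩
    · subst hq
      rw [show q + q = 2*q from by omega, pvLb_even (by omega)]
      have h1 := ih q (by omega) (by omega)
      have h2 : 2*q - 2*pvLb q = 2*(q - pvLb q) := by omega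
      rw [h2]
      obtain ⟨c, hc⟩ := h1
      exact ⟨c, by rw [hc]; ring⟩
    · subst hq
      rw [pvLb_odd]
      exact ⟨q, by omega⟩

theorem pvLb_pow2_dvd : ∀ n k, 0 < n → 2^k ∣ n → 2^k ∣ pvLb n := by
  intro n
  induction n using Nat.strong_induction_on with
  | _ n ih =>
    intro k hn hd
    cases k with
    | zero => exact Nat.one_dvd _
    | succ k =>
      rcases Nat.even_or_odd n with ⟨q, hq⟩ | ⟨q, hq⟩
      · subst hq
        rw [show q + q = 2*q from by omega, pvLb_even (by omega)]
        have hq2 : 2^k ∣ q := by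
          have h2 : (2:Nat) * 2^k ∣ 2 * q := by
            rw [← pow_succ']
            exact dvd_trans hd ⟨1, by omega⟩
          exact (Nat.mul_dvd_mul_iff_left (by norm_num : (0:Nat) < 2)).mp h2
        have := ih q (by omega) k (by omega) hq2
        rw [pow_succ']
        exact Nat.mul_dvd_mul_left 2 this
      · subst hq
        exfalso
        have h2 : (2:Nat) ∣ 2*q+1 := dvd_trans ⟨2^k, by rw [pow_succ]; ring⟩ hd
        omega

theorem pvLb_congr : ∀ u t r, 0 < r → r < 2^u → pvLb (r + 2^u * t) = pvLb r := by
  intro u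
  induction u with
  | zero => intro t r hr hru; exfalso; rw [pow_zero] at hru; omega
  | succ u ih =>
    intro t r hr hru
    rcases Nat.even_or_odd r with ⟨q, hq⟩ | ⟨q, hq⟩
    · subst hq
      have hq0 : 0 < q := by omega
      have h1 : q + q + 2^(u+1) * t = 2 * (q + 2^u * t) := by rw [pow_succ]; ring
      rw [h1, pvLb_even (by positivity), show q + q = 2*q from by omega, pvLb_even hq0,
        ih t q hq0 (by rw [pow_succ] at hru; omega)]
    · subst hq
      have h1 : 2*q+1 + 2^(u+1) * t = 2 * (q + 2^u * t) + 1 := by rw [pow_succ]; ring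
      rw [h1, pvLb_odd, pvLb_odd]

theorem pvChainMid {i p : Nat} (_hi : 0 < i) (h1 : p - pvLb p < i) (h2 : i ≤ p) :
    ∀ q, p < q → q < p + pvLb p → i ≤ q - pvLb q := by
  intro q hq1 hq2
  obtain ⟨u, hu⟩ := pvLb_pow2 p (by omega)
  obtain ⟨s, hs⟩ := pvLb_dvd p (by omega)
  set t := q - p with ht
  have htp : 0 < t ∧ t < 2^u := by rw [hu] at hq2; omega
  have hq : q = t + 2^u * s := by rw [hu] at hs; omega
  have : pvLb q = pvLb t := by rw [hq]; exact pvLb_congr u s t htp.1 htp.2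
  have hle : pvLb t ≤ t := pvLb_le
  omega

theorem pvChainNext {i p : Nat} (_hi : 0 < i) (h1 : p - pvLb p < i) (h2 : i ≤ p) :
    (p + pvLb p) - pvLb (p + pvLb p) < i := by
  have hp : 0 < p := by omega
  obtain ⟨u, hu⟩ := pvLb_pow2 p hp
  obtain ⟨c, hc⟩ := pvLb_dvd_sub p hp
  have hlbp : 0 < pvLb p := pvLb_pos hp
  have hple : pvLb p ≤ p := pvLb_le
  have hdvd : 2^(u+1) ∣ (p + pvLb p) := by
    have hsub : pvLb p ≤ p := pvLb_le
    have hp' : p + pvLb p = 2 * pvLb p * (c+1) := by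
      rw [Nat.mul_add, Nat.mul_one]
      omega
    refine ⟨c + 1, ?_⟩
    rw [pow_succ, ← hu, hp']
    ring
  have := pvLb_pow2_dvd (p + pvLb p) (u+1) (by omega) hdvd
  have hge : 2^(u+1) ≤ pvLb (p + pvLb p) :=
    Nat.le_of_dvd (pvLb_pos (by omega)) this
  rw [pow_succ] at hge
  rw [hu] at hge h1 ⊢
  omega
-- ===== Part 1: abstract Fenwick correctness =====

def pvRep (a : List Int) (n : Nat) (pts : Nat → Int) : Prop :=
  a.length = n + 1 ∧ a.getD 0 0 = 0 ∧
    ∀ p : Nat, 1 ≤ p → p ≤ n → a.getD p 0 = ∑ q ∈ Finset.Ioc (p - pvLb p) p, pts q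

theorem pvRep_init (n : Nat) : pvRep (List.replicate (n+1) 0) n (fun _ => 0) := by
  refine ⟨by simp, by simp, ?_⟩
  intro p h1 h2
  simp

theorem pvFenQueryLoop_spec (n : Nat) (pts : Nat → Int) (a : List Int) (h : pvRep a n pts) :
    ∀ (i : Nat), i ≤ n → ∀ s, pvFenQueryLoop a (i : Int) s = s + ∑ q ∈ Finset.Ioc 0 i, pts q := by
  intro i
  induction i using Nat.strong_induction_on with
  | _ i ih =>
    intro hin s
    rw [pvFenQueryLoop]
    by_cases hi : 0 < i
    · rw [dif_pos (by exact_mod_cast hi)]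
      have hb : PySem.Int.band (i : Int) (-(i : Int)) = ((pvLb i : Nat) : Int) := by
        rw [pvBand_neg _ (by exact_mod_cast hi)]
        simp
      rw [hb]
      have hlbp := pvLb_pos hi
      have hlble := pvLb_le (n := i)
      have hcast : (i : Int) - ((pvLb i : Nat) : Int) = ((i - pvLb i : Nat) : Int) := by
        push_cast [Nat.cast_sub hlble]; ring
      rw [hcast]
      rw [ih (i - pvLb i) (by omega) (by omega)]
      rw [show PySem.List.pyGetD a (i : Int) 0 = a.getD i 0 from PySem.List.pyGetD_natCast a i 0]
      rw [h.2.2 i (by omega) hin]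
      rw [← Finset.sum_Ioc_consecutive pts (by omega : 0 ≤ i - pvLb i) (by omega : i - pvLb i ≤ i)]
      ring
    · rw [dif_neg (by exact_mod_cast hi)]
      have : i = 0 := by omega
      subst this
      simp

theorem pvFenQuery_spec {n : Nat} {pts : Nat → Int} {a : List Int} (h : pvRep a n pts)
    (k : Nat) (hk : k ≤ n) : pvFenQuery a (k : Int) = ∑ q ∈ Finset.Ioc 0 k, pts q := by
  unfold pvFenQuery
  by_cases hk0 : 0 < k
  · rw [if_pos (by exact_mod_cast hk0), pvFenQueryLoop_spec n pts a h k hk 0]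
    ring
  · have : k = 0 := by omega
    subst this
    rw [if_neg (by omega)]
    rw [PySem.List.pyGetD_natCast, h.2.1]
    simp

theorem pvFenAddLoop_slots (n : Nat) (v : Int) (i : Nat) (hi : 1 ≤ i) :
    ∀ (fuel : Nat) (p : Nat) (a : List Int), n + 1 - p ≤ fuel → i ≤ p → p - pvLb p < i →
      a.length = n + 1 →
      (pvFenAddLoop a (p : Int) v).length = n + 1 ∧
      ∀ q : Nat, q ≤ n →
        (pvFenAddLoop a (p : Int) v).getD q 0
          = a.getD q 0 + (if p ≤ q ∧ q - pvLb q < i then v else 0) := by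
  intro fuel
  induction fuel with
  | zero =>
    intro p a hf hip hplb hlen
    -- p > n: the loop exits immediately
    rw [pvFenAddLoop, dif_neg (by rw [PySem.List.len_eq, hlen]; omega)]
    refine ⟨hlen, ?_⟩
    intro q hq
    rw [if_neg (by omega)]
    ring
  | succ fuel ih =>
    intro p a hf hip hplb hlen
    by_cases hpn : p ≤ n
    case neg =>
      rw [pvFenAddLoop, dif_neg (by rw [PySem.List.len_eq, hlen]; omega)]
      refine ⟨hlen, ?_⟩
      intro q hq
      rw [if_neg (by omega)]
      ring
    · rw [pvFenAddLoop, dif_pos (by rw [PySem.List.len_eq, hlen]; omega)]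
      have hp0 : 0 < p := by omega
      have hb : PySem.Int.band (p : Int) (-(p : Int)) = ((pvLb p : Nat) : Int) := by
        rw [pvBand_neg _ (by exact_mod_cast hp0)]; simp
      rw [hb]
      have hlbp := pvLb_pos hp0
      set a' := PySem.List.pySetD a (p : Int) (PySem.List.pyGetD a (p : Int) 0 + v) with ha'
      have ha'set : a' = a.set p (a.getD p 0 + v) := by
        rw [ha', PySem.List.pySetD_natCast, PySem.List.pyGetD_natCast]
      have hlen' : a'.length = n + 1 := by rw [ha'set, List.length_set, hlen]
      have hcast : (p : Int) + ((pvLb p : Nat) : Int) = ((p + pvLb p : Nat) : Int) := by push_cast; ring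
      rw [hcast]
      have hnext := pvChainNext (i := i) (p := p) (by omega) hplb hip
      obtain ⟨hL, hS⟩ := ih (p + pvLb p) a' (by omega) (by omega) hnext hlen'
      refine ⟨hL, ?_⟩
      intro q hq
      rw [hS q hq]
      have hgetD : a'.getD q 0 = a.getD q 0 + (if q = p then v else 0) := by
        rw [ha'set]
        by_cases hqp : q = p
        · subst hqp
          rw [if_pos rfl, List.getD_eq_getElem?_getD, List.getElem?_set_self (by omega), List.getD_eq_getElem?_getD]
          simp [List.getElem?_eq_getElem (by omega : q < a.length)]
        · rw [if_neg hqp, List.getD_eq_getElem?_getD, List.getElem?_set_ne (by omega), ← List.getD_eq_getElem?_getD]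
          ring
      rw [hgetD]
      by_cases hqp : q = p
      · subst hqp
        rw [if_pos rfl, if_neg (by omega), if_pos ⟨le_refl q, hplb⟩]
        ring
      · rw [if_neg hqp]
        by_cases hmid : p < q ∧ q < p + pvLb p
        · have := pvChainMid (i := i) (p := p) (by omega) hplb hip q hmid.1 hmid.2
          rw [if_neg (by omega), if_neg (by omega)]
          ring
        · by_cases hge : p + pvLb p ≤ q
          · have : (p + pvLb p ≤ q ∧ q - pvLb q < i) ↔ (p ≤ q ∧ q - pvLb q < i) := by
              constructor <;> intro hx <;> exact ⟨by omega, hx.2⟩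
            rw [if_congr this rfl rfl]
            ring
          · rw [if_neg (by omega), if_neg (by omega)]
            ring

theorem pvFenAdd_rep {a : List Int} {n : Nat} {pts : Nat → Int} (h : pvRep a n pts)
    (i : Nat) (hi1 : 1 ≤ i) (hi2 : i ≤ n) (v : Int) :
    pvRep (pvFenAdd a (i : Int) v) n (fun q => pts q + if q = i then v else 0) := by
  unfold pvFenAdd
  rw [if_neg (by exact_mod_cast (by omega : ¬ (i : Int) = 0))]
  obtain ⟨hL, hS⟩ := pvFenAddLoop_slots n v i hi1 (n + 1) i a (by omega) (by omega)
      (by have := pvLb_pos (show 0 < i by omega); omega) h.1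
  refine ⟨hL, ?_, ?_⟩
  · rw [hS 0 (by omega), if_neg (by omega), h.2.1]
    ring
  · intro p h1 h2
    rw [hS p (by omega), h.2.2 p h1 h2]
    have hmem : (i ∈ Finset.Ioc (p - pvLb p) p) ↔ (i ≤ p ∧ p - pvLb p < i) := by
      rw [Finset.mem_Ioc]; omega
    rw [Finset.sum_add_distrib, Finset.sum_ite_eq' (Finset.Ioc (p - pvLb p) p) i (fun _ => v)]
    by_cases hc : i ≤ p ∧ p - pvLb p < i
    · rw [if_pos hc, if_pos (hmem.mpr hc)]
    · rw [if_neg hc, if_neg (fun hx => hc (hmem.mp hx))]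
-- ===== Part 2: the canonical dp list and B's loop =====

def pvE (nums : List Int) (d : Int) : List (Int × Int) :=
  (PySem.List.enumerate nums 0).filter (fun p => decide (0 < p.2 ∧ PySem.Int.mod p.2 d = 0))

def pvVals (nums : List Int) (d : Int) : List Int := (pvE nums d).map (fun p => p.2)

def pvIdx (nums : List Int) (d : Int) : List Int := (pvE nums d).map (fun p => p.1)

def pvDpAux : List (Int × Int) → List Int → List (Int × Int)
  | done, [] => done
  | done, v :: r =>
    pvDpAux (done ++ [(v, 1 + ((done.filter (fun p => p.1 < v)).map (fun p => p.2)).sum)]) r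

def pvD (nums : List Int) (d : Int) : List (Int × Int) := pvDpAux [] (pvVals nums d)

theorem pvDpAux_prefix : ∀ (l : List Int) (done : List (Int × Int)), done <+: pvDpAux done l := by
  intro l
  induction l with
  | nil => intro done; exact List.prefix_rfl
  | cons v r ih =>
    intro done
    exact List.IsPrefix.trans (List.prefix_append done _) (ih _)

theorem pvDpAux_length : ∀ (l : List Int) (done : List (Int × Int)),
    (pvDpAux done l).length = done.length + l.length := by
  intro l
  induction l with
  | nil => intro done; simp [pvDpAux]
  | cons v r ih =>
    intro done
    rw [pvDpAux, ih]
    simp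
    omega

theorem pvDpAux_getD : ∀ (l : List Int) (done : List (Int × Int)) (k : Nat),
    done.length ≤ k → k < done.length + l.length →
    (pvDpAux done l).getD k (0, 0) =
      (l.getD (k - done.length) 0,
       1 + ((((pvDpAux done l).take k).filter
              (fun p => p.1 < l.getD (k - done.length) 0)).map (fun p => p.2)).sum) := by
  intro l
  induction l with
  | nil => intro done k h1 h2; simp at h2; omega
  | cons v r ih =>
    intro done k h1 h2
    rw [pvDpAux]
    set c0 : Int := 1 + ((done.filter (fun p => p.1 < v)).map (fun p => p.2)).sum with hc0
    set done' := done ++ [(v, c0)] with hdone'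
    by_cases hk : k = done.length
    · subst hk
      have hpre : done' <+: pvDpAux done' r := pvDpAux_prefix r done'
      have hlen' : done'.length = done.length + 1 := by simp [hdone']
      obtain ⟨t, ht⟩ := hpre
      have hget : (pvDpAux done' r).getD done.length (0, 0) = (v, c0) := by
        rw [← ht, List.getD_eq_getElem?_getD, List.getElem?_append_left (by omega),
          hdone', List.getElem?_append_right (by omega)]
        simp
      have htake : (pvDpAux done' r).take done.length = done := by
        have : done <+: pvDpAux done' r :=
          List.IsPrefix.trans (List.prefix_append done _) (pvDpAux_prefix r done')
        rw [List.prefix_iff_eq_take] at this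
        exact this.symm
      rw [hget, Nat.sub_self, List.getD_cons_zero, htake]
    · have h1' : done'.length ≤ k := by simp [hdone']; omega
      have h2' : k < done'.length + r.length := by simp [hdone']; simp at h2; omega
      rw [ih done' k h1' h2']
      have : k - done.length = (k - done'.length) + 1 := by simp [hdone']; omega
      rw [this]
      simp [hdone']
-- B's inner fold computes (pvDpAux done l, accumulated total)

theorem pvDp_fold : ∀ (l : List Int) (done : List (Int × Int)) (t : Int),
    l.foldl (fun st v =>
        (st.1 ++ [(v, 1 + ((st.1.filter (fun p => p.1 < v)).map (fun p => p.2)).sum)],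
         st.2 + (1 + ((st.1.filter (fun p => p.1 < v)).map (fun p => p.2)).sum))) (done, t)
      = (pvDpAux done l,
         t + ((pvDpAux done l).map (fun p => p.2)).sum - (done.map (fun p => p.2)).sum) := by
  intro l
  induction l with
  | nil => intro done t; simp [pvDpAux]
  | cons v r ih =>
    intro done t
    rw [List.foldl_cons, pvDpAux, ih]
    refine Prod.ext_iff.mpr ⟨rfl, ?_⟩
    simp only [List.map_append, List.sum_append, List.map_cons, List.sum_cons, List.map_nil,
      List.sum_nil]
    ring

theorem map_snd_filter_enumerate (q : Int → Bool) :
    ∀ (nums : List Int) (s : Int),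
      ((PySem.List.enumerate nums s).filter (fun p => q p.2)).map (fun p => p.2)
        = nums.filter q := by
  intro nums
  induction nums with
  | nil => intro s; simp [PySem.List.enumerate_nil]
  | cons x xs ih =>
    intro s
    rw [PySem.List.enumerate_cons]
    simp only [List.filter_cons]
    by_cases hq : q x = true
    · simp [hq, ih (s+1)]
    · simp [hq, ih (s+1)]

theorem pvSum_map_getD (f : Int × Int → Int) :
    ∀ (l : List (Int × Int)), (l.map f).sum = ∑ j ∈ Finset.range l.length, f (l.getD j (0,0)) := by
  intro l
  induction l with
  | nil => simp
  | cons x xs ih =>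
    rw [List.map_cons, List.sum_cons, ih, List.length_cons, Finset.sum_range_succ']
    simp
    ring

theorem pvTakeFilterSum (D : List (Int × Int)) (b : Int) :
    ∀ (k : Nat), k ≤ D.length →
      (((D.take k).filter (fun p => p.1 < b)).map (fun p => p.2)).sum
        = ∑ j ∈ Finset.range k, if (D.getD j (0,0)).1 < b then (D.getD j (0,0)).2 else 0 := by
  intro k
  induction k with
  | zero => intro h; simp
  | succ k ih =>
    intro h
    rw [List.take_add_one, Finset.sum_range_succ, ← ih (by omega)]
    have : D[k]? = some (D.getD k (0,0)) := by
      rw [List.getElem?_eq_getElem (by omega), List.getD_eq_getElem?_getD,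
        List.getElem?_eq_getElem (by omega)]
      simp
    rw [this]
    simp only [Option.toList_some, List.filter_append, List.map_append, List.sum_append]
    by_cases hb : (D.getD k (0,0)).1 < b
    · rw [if_pos hb]
      have hb' : decide ((D[k]?.getD ((0:Int),(0:Int))).1 < b) = true := by
        rw [this]; simpa using hb
      simp [hb']
    · rw [if_neg hb]
      have hb' : decide ((D[k]?.getD ((0:Int),(0:Int))).1 < b) = false := by
        rw [this]; simpa using hb
      simp [hb']
-- ===== Part 3: A's data structures characterized =====

def pvLocsv (nums : List Int) (v : Int) : List Int :=
  ((PySem.List.enumerate nums 0).filter (fun p => p.2 == v)).map (fun p => p.1)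

def pvValAt (nums : List Int) (pos : Int) : Int := nums.getD pos.toNat 0

def pvRaw (nums : List Int) (d m : Int) : List Int :=
  (PySem.List.pyRange d m d).flatMap (pvLocsv nums)

def pvL (nums : List Int) (d m : Int) : List Int :=
  (PySem.List.pyRange d m d).flatMap (fun v => (pvLocsv nums v).reverse)

def pvR (nums : List Int) (x y : Int) : Prop :=
  pvValAt nums x < pvValAt nums y ∨ (pvValAt nums x = pvValAt nums y ∧ y < x)

def pvN (nums : List Int) (d : Int) : Nat := (pvE nums d).length

def pvValj (nums : List Int) (d : Int) (j : Nat) : Int := (pvVals nums d).getD j 0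

def pvDpj (nums : List Int) (d : Int) (j : Nat) : Int := ((pvD nums d).getD j (0,0)).2

def pvPts (nums : List Int) (d : Int) (T : List Int) : Nat → Int :=
  fun r => if (pvIdx nums d).getD (r-1) 0 ∈ T then pvDpj nums d (r-1) else 0

theorem pvLocs_getD (nums : List Int) (v : Int) :
    (pvLocs nums).getD v [] = pvLocsv nums v := by
  unfold pvLocs pvLocsv
  have h1 : (PySem.List.enumerate nums 0).foldl (fun d p => d.modify p.2 [] (· ++ [p.1]))
        PySem.Dict.empty
      = ((PySem.List.enumerate nums 0).map Prod.swap).foldl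
          (fun d p => d.modify p.1 [] (· ++ [p.2])) PySem.Dict.empty := by
    rw [List.foldl_map]
    exact PySem.List.foldl_congr_mem _ _ _ _ (fun acc x _ => rfl)
  rw [h1, PySem.Dict.getD_foldl_modify_append, List.filter_map]
  have h2 : ((fun p : Int × Int => p.1 == v) ∘ Prod.swap) = (fun p : Int × Int => p.2 == v) := by
    funext p; rfl
  rw [h2, List.map_map]
  simp

theorem mem_pvLocsv (nums : List Int) (v pos : Int) :
    pos ∈ pvLocsv nums v ↔ (pos, v) ∈ PySem.List.enumerate nums 0 := by
  unfold pvLocsv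
  simp only [List.mem_map, List.mem_filter]
  constructor
  · rintro ⟨p, ⟨hp, hv⟩, hfst⟩
    have : p = (pos, v) := by
      have := beq_iff_eq.mp hv
      obtain ⟨a, b⟩ := p
      simp_all
    rwa [this] at hp
  · intro h
    exact ⟨(pos, v), ⟨h, by simp⟩, rfl⟩

theorem pvLocsv_pairwise (nums : List Int) (v : Int) :
    (pvLocsv nums v).Pairwise (· < ·) := by
  unfold pvLocsv
  rw [List.pairwise_map]
  exact (PySem.List.pairwise_lt_enumerate nums 0).filter _

theorem pvValAt_enumerate (nums : List Int) (pos v : Int)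
    (h : (pos, v) ∈ PySem.List.enumerate nums 0) : pvValAt nums pos = v := by
  rw [PySem.List.mem_enumerate_iff] at h
  obtain ⟨k, hk, hpv⟩ := h
  rw [Prod.mk.injEq] at hpv
  obtain ⟨h1, h2⟩ := hpv
  have h3 : pos.toNat = k := by omega
  rw [pvValAt, h3, h2]
  simp [List.getD_eq_getElem?_getD, List.getElem?_eq_getElem hk]

theorem pvEnumerate_fst_inj (nums : List Int) (pos v v' : Int)
    (h : (pos, v) ∈ PySem.List.enumerate nums 0) (h' : (pos, v') ∈ PySem.List.enumerate nums 0) :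
    v = v' := by
  rw [← pvValAt_enumerate nums pos v h, ← pvValAt_enumerate nums pos v' h']

theorem mem_pvE (nums : List Int) (d : Int) (p : Int × Int) :
    p ∈ pvE nums d ↔ p ∈ PySem.List.enumerate nums 0 ∧ 0 < p.2 ∧ PySem.Int.mod p.2 d = 0 := by
  unfold pvE
  rw [List.mem_filter]
  simp

theorem mem_pvIdx (nums : List Int) (d : Int) (pos : Int) :
    pos ∈ pvIdx nums d ↔ ∃ v, (pos, v) ∈ PySem.List.enumerate nums 0 ∧ 0 < v ∧
      PySem.Int.mod v d = 0 := by
  unfold pvIdx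
  rw [List.mem_map]
  constructor
  · rintro ⟨p, hp, hfst⟩
    rw [mem_pvE] at hp
    refine ⟨p.2, ?_, hp.2.1, hp.2.2⟩
    rw [← hfst]
    simpa using hp.1
  · rintro ⟨v, hv, h1, h2⟩
    exact ⟨(pos, v), (mem_pvE nums d (pos, v)).mpr ⟨hv, h1, h2⟩, rfl⟩

theorem pvIdx_pairwise (nums : List Int) (d : Int) : (pvIdx nums d).Pairwise (· < ·) := by
  unfold pvIdx pvE
  rw [List.pairwise_map]
  exact (PySem.List.pairwise_lt_enumerate nums 0).filter _

theorem pvIdx_nodup (nums : List Int) (d : Int) : (pvIdx nums d).Nodup :=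
  (pvIdx_pairwise nums d).imp (fun h => ne_of_lt h)

theorem pvMult_iff (nums : List Int) (d m v : Int) (hd : 0 < d) (hm : ∀ x ∈ nums, x < m)
    (hv : v ∈ nums) : (0 < v ∧ PySem.Int.mod v d = 0) ↔ (d ≤ v ∧ v < m ∧ d ∣ (v - d)) := by
  rw [PySem.Int.mod_eq_zero_iff_dvd]
  constructor
  · rintro ⟨h1, h2⟩
    exact ⟨Int.le_of_dvd h1 h2, hm v hv, (dvd_sub_right h2).mpr dvd_rfl⟩
  · rintro ⟨h1, h2, h3⟩
    refine ⟨by omega, ?_⟩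
    have : v = (v - d) + d := by ring
    rw [this]
    exact dvd_add h3 dvd_rfl

theorem mem_pvRaw (nums : List Int) (d m pos : Int) (hd : 0 < d) (hm : ∀ x ∈ nums, x < m) :
    pos ∈ pvRaw nums d m ↔ pos ∈ pvIdx nums d := by
  unfold pvRaw
  rw [List.mem_flatMap, mem_pvIdx]
  constructor
  · rintro ⟨v, hvr, hpos⟩
    rw [PySem.List.mem_pyRange_iff_of_pos hd] at hvr
    rw [mem_pvLocsv] at hpos
    have hvnums : v ∈ nums := by
      rw [PySem.List.mem_enumerate_iff] at hpos
      obtain ⟨k, hk, hpv⟩ := hpos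
      have : v = nums[k] := congrArg Prod.snd hpv
      rw [this]; exact List.getElem_mem hk
    exact ⟨v, (mem_pvLocsv nums v pos).mp (by rwa [mem_pvLocsv]), by
      have := (pvMult_iff nums d m v hd hm hvnums).mpr ⟨hvr.1, hvr.2.1, hvr.2.2⟩
      exact this⟩
  · rintro ⟨v, hv, h1, h2⟩
    have hvnums : v ∈ nums := by
      rw [PySem.List.mem_enumerate_iff] at hv
      obtain ⟨k, hk, hpv⟩ := hv
      have : v = nums[k] := congrArg Prod.snd hpv
      rw [this]; exact List.getElem_mem hk
    have := (pvMult_iff nums d m v hd hm hvnums).mp ⟨h1, h2⟩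
    exact ⟨v, (PySem.List.mem_pyRange_iff_of_pos hd v).mpr ⟨this.1, this.2.1, this.2.2⟩,
      (mem_pvLocsv nums v pos).mpr hv⟩

theorem mem_pvL (nums : List Int) (d m pos : Int) (hd : 0 < d) (hm : ∀ x ∈ nums, x < m) :
    pos ∈ pvL nums d m ↔ pos ∈ pvIdx nums d := by
  unfold pvL
  rw [List.mem_flatMap]
  rw [← mem_pvRaw nums d m pos hd hm]
  unfold pvRaw
  rw [List.mem_flatMap]
  constructor
  · rintro ⟨v, hv, hpos⟩; exact ⟨v, hv, by simpa using hpos⟩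
  · rintro ⟨v, hv, hpos⟩; exact ⟨v, hv, by simpa using hpos⟩

theorem pvRange_pairwise (d m : Int) (hd : 0 < d) :
    (PySem.List.pyRange d m d).Pairwise (· < ·) := by
  rw [PySem.List.pyRange_of_pos d m hd]
  rw [List.pairwise_map]
  have := List.pairwise_lt_range (n := (if d < m then ((m - d + d - 1) / d).toNat else 0))
  refine this.imp ?_
  intro a b hab
  have : (a : Int) < (b : Int) := by exact_mod_cast hab
  nlinarith

theorem pvBlocks_disjoint (nums : List Int) (v v' : Int) (hne : v ≠ v') :
    ∀ pos, pos ∈ pvLocsv nums v → pos ∈ pvLocsv nums v' → False := by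
  intro pos h1 h2
  rw [mem_pvLocsv] at h1 h2
  exact hne (pvEnumerate_fst_inj nums pos v v' h1 h2)

theorem pvRaw_nodup (nums : List Int) (d m : Int) (hd : 0 < d) : (pvRaw nums d m).Nodup := by
  unfold pvRaw
  rw [List.nodup_flatMap]
  refine ⟨fun v _ => (pvLocsv_pairwise nums v).imp (fun h => ne_of_lt h), ?_⟩
  refine (pvRange_pairwise d m hd).imp ?_
  intro v v' hlt
  intro pos h1 h2
  exact pvBlocks_disjoint nums v v' (ne_of_lt hlt) pos h1 h2

theorem pvSorted_raw (nums : List Int) (d m : Int) (hd : 0 < d) (hm : ∀ x ∈ nums, x < m) :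
    PySem.List.sorted (pvRaw nums d m) (fun x => x) = pvIdx nums d := by
  apply PySem.List.sorted_eq_of_perm_of_pairwise_lt
  · rw [List.perm_ext_iff_of_nodup (pvIdx_nodup nums d) (pvRaw_nodup nums d m hd)]
    intro a
    rw [mem_pvRaw nums d m a hd hm]
  · exact pvIdx_pairwise nums d

theorem pvL_pairwise (nums : List Int) (d m : Int) (hd : 0 < d) :
    (pvL nums d m).Pairwise (pvR nums) := by
  unfold pvL
  rw [List.pairwise_flatMap]
  constructor
  · intro v _
    rw [List.pairwise_reverse]
    have := pvLocsv_pairwise nums v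
    refine this.imp_of_mem ?_
    intro a b ha hb hab
    right
    constructor
    · rw [pvValAt_enumerate nums a v ((mem_pvLocsv nums v a).mp ha),
        pvValAt_enumerate nums b v ((mem_pvLocsv nums v b).mp hb)]
    · exact hab
  · refine (pvRange_pairwise d m hd).imp_of_mem ?_
    intro v v' hv hv' hlt
    intro x hx y hy
    rw [List.mem_reverse] at hx hy
    left
    rw [pvValAt_enumerate nums x v ((mem_pvLocsv nums v x).mp hx),
      pvValAt_enumerate nums y v' ((mem_pvLocsv nums v' y).mp hy)]
    exact hlt

theorem pvR_asymm (nums : List Int) (a b : Int) (h1 : pvR nums a b) (h2 : pvR nums b a) : False := by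
  unfold pvR at h1 h2
  omega
-- ===== Part 4: the per-divisor processing loop of A computes sum of dp =====

theorem pvSumIoc (g : Nat → Int) : ∀ k, ∑ q ∈ Finset.Ioc 0 k, g q = ∑ j ∈ Finset.range k, g (j+1) := by
  intro k
  induction k with
  | zero => simp
  | succ k ih =>
    rw [Finset.sum_Ioc_succ_top (by omega), ih, Finset.sum_range_succ]

theorem pvRep_congr {a : List Int} {n : Nat} {pts pts' : Nat → Int} (h : pvRep a n pts)
    (hp : ∀ q, 1 ≤ q → q ≤ n → pts q = pts' q) : pvRep a n pts' := by
  refine ⟨h.1, h.2.1, ?_⟩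
  intro p h1 h2
  rw [h.2.2 p h1 h2]
  refine Finset.sum_congr rfl ?_
  intro q hq
  rw [Finset.mem_Ioc] at hq
  exact hp q (by omega) (by omega)

theorem pvSplit_mem {α : Type} {R : α → α → Prop} (hasym : ∀ a b, R a b → R b a → False)
    (T rest : List α) (pos x : α) (hP : (T ++ pos :: rest).Pairwise R)
    (hx : x ∈ T ++ pos :: rest) : x ∈ T ↔ R x pos := by
  rw [List.pairwise_append] at hP
  obtain ⟨hT, hPR, hcross⟩ := hP
  constructor
  · intro hxT
    exact hcross x hxT pos (List.mem_cons_self)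
  · intro hR
    rcases List.mem_append.mp hx with h | h
    · exact h
    · rcases List.mem_cons.mp h with h | h
      · subst h; exact absurd hR (fun hh => hasym x x hh hh)
      · exact absurd hR (fun hh =>
          hasym x pos hh ((List.pairwise_cons.mp hPR).1 x h))

theorem pvIdx_length (nums : List Int) (d : Int) : (pvIdx nums d).length = pvN nums d := by
  rw [pvIdx, List.length_map]; rfl

theorem pvVals_length (nums : List Int) (d : Int) : (pvVals nums d).length = pvN nums d := by
  rw [pvVals, List.length_map]; rfl

theorem pvD_length (nums : List Int) (d : Int) : (pvD nums d).length = pvN nums d := by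
  rw [pvD, pvDpAux_length]
  simp [pvVals_length]

theorem pvS_getD_eq (nums : List Int) (d : Int) (k : Nat) (hk : k < pvN nums d) :
    (pvIdx nums d).getD k 0 = ((pvE nums d)[k]'(hk)).1 := by
  rw [List.getD_eq_getElem _ _ (by rw [pvIdx_length]; omega)]
  unfold pvIdx
  simp
  rfl

theorem pvValj_eq (nums : List Int) (d : Int) (k : Nat) (hk : k < pvN nums d) :
    pvValj nums d k = ((pvE nums d)[k]'(hk)).2 := by
  rw [pvValj, List.getD_eq_getElem _ _ (by rw [pvVals_length]; omega)]
  unfold pvVals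
  simp
  rfl

theorem pvValAt_S (nums : List Int) (d : Int) (k : Nat) (hk : k < pvN nums d) :
    pvValAt nums ((pvIdx nums d).getD k 0) = pvValj nums d k := by
  rw [pvS_getD_eq nums d k hk, pvValj_eq nums d k hk]
  have hmem : (pvE nums d)[k] ∈ pvE nums d := List.getElem_mem hk
  rw [mem_pvE] at hmem
  have := pvValAt_enumerate nums ((pvE nums d)[k]).1 ((pvE nums d)[k]).2 (by
    rw [Prod.mk.eta]; exact hmem.1)
  exact this

theorem pvS_lt (nums : List Int) (d : Int) (j k : Nat) (hj : j < k) (hk : k < pvN nums d) :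
    (pvIdx nums d).getD j 0 < (pvIdx nums d).getD k 0 := by
  have hp := pvIdx_pairwise nums d
  rw [List.pairwise_iff_getElem] at hp
  have hlen : (pvIdx nums d).length = pvN nums d := pvIdx_length nums d
  have := hp j k (by omega) (by omega) hj
  rwa [List.getD_eq_getElem _ _ (by omega), List.getD_eq_getElem _ _ (by omega)]

theorem pvS_mem (nums : List Int) (d : Int) (k : Nat) (hk : k < pvN nums d) :
    (pvIdx nums d).getD k 0 ∈ pvIdx nums d := by
  rw [List.getD_eq_getElem _ _ (by rw [pvIdx_length]; omega)]
  exact List.getElem_mem _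

theorem pvS_inj (nums : List Int) (d : Int) (j k : Nat) (hj : j < pvN nums d)
    (hk : k < pvN nums d) (h : (pvIdx nums d).getD j 0 = (pvIdx nums d).getD k 0) : j = k := by
  by_contra hne
  rcases Nat.lt_or_ge j k with hlt | hge
  · have := pvS_lt nums d j k hlt hk; omega
  · have := pvS_lt nums d k j (by omega) hj; omega

theorem pvD_fst (nums : List Int) (d : Int) (k : Nat) (hk : k < pvN nums d) :
    ((pvD nums d).getD k (0,0)).1 = pvValj nums d k := by
  rw [pvD, pvDpAux_getD (pvVals nums d) [] k (by simp) (by simp [pvVals_length]; omega)]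
  simp [pvValj]

theorem pvDp_rec (nums : List Int) (d : Int) (k : Nat) (hk : k < pvN nums d) :
    pvDpj nums d k = 1 + ∑ j ∈ Finset.range k,
      if pvValj nums d j < pvValj nums d k then pvDpj nums d j else 0 := by
  have hD : (pvD nums d).getD k (0,0) = ((pvVals nums d).getD k 0,
      1 + ((((pvD nums d).take k).filter
            (fun p => p.1 < (pvVals nums d).getD k 0)).map (fun p => p.2)).sum) := by
    rw [pvD, pvDpAux_getD (pvVals nums d) [] k (by simp) (by simp [pvVals_length]; omega)]
    simp only [List.length_nil, Nat.sub_zero]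
    rfl
  rw [pvDpj, hD]
  simp only []
  rw [pvTakeFilterSum (pvD nums d) _ k (by rw [pvD_length]; omega)]
  congr 1
  refine Finset.sum_congr rfl ?_
  intro j hj
  rw [Finset.mem_range] at hj
  rw [pvD_fst nums d j (by omega)]
  rfl

theorem pvR_S (nums : List Int) (d : Int) (j k : Nat) (hjk : j < k) (hk : k < pvN nums d) :
    pvR nums ((pvIdx nums d).getD j 0) ((pvIdx nums d).getD k 0)
      ↔ pvValj nums d j < pvValj nums d k := by
  unfold pvR
  rw [pvValAt_S nums d j (by omega), pvValAt_S nums d k hk]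
  have := pvS_lt nums d j k hjk hk
  omega
theorem pvProcess (nums : List Int) (d m : Int) (hd : 0 < d) (hm : ∀ x ∈ nums, x < m)
    (rank : PySem.Dict Int Int)
    (hrank : ∀ k : Nat, k < pvN nums d → rank.getD ((pvIdx nums d).getD k 0) 0 = 1 + (k : Int)) :
    ∀ (rest T : List Int), pvL nums d m = T ++ rest →
    ∀ (acc : Int) (fen : List Int), pvRep fen (pvN nums d) (pvPts nums d T) →
    (rest.foldl (fun st pos =>
        (st.1 + (1 + pvFenQuery st.2 (rank.getD pos 0 - 1)),
         pvFenAdd st.2 (rank.getD pos 0) (1 + pvFenQuery st.2 (rank.getD pos 0 - 1)))) (acc, fen)).1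
      = acc + ∑ j ∈ Finset.range (pvN nums d),
          (if (pvIdx nums d).getD j 0 ∈ rest then pvDpj nums d j else 0) := by
  intro rest
  induction rest with
  | nil =>
    intro T hTL acc fen hrep
    simp
  | cons pos rest' ih =>
    intro T hTL acc fen hrep
    have hLpw : (T ++ pos :: rest').Pairwise (pvR nums) := by
      rw [← hTL]; exact pvL_pairwise nums d m hd
    have hposL : pos ∈ pvL nums d m := by
      rw [hTL]; exact List.mem_append_right T (List.mem_cons_self)
    have hposS : pos ∈ pvIdx nums d := (mem_pvL nums d m pos hd hm).mp hposL
    obtain ⟨k, hk, hSk⟩ : ∃ k, k < pvN nums d ∧ (pvIdx nums d).getD k 0 = pos := by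
      rw [List.mem_iff_getElem] at hposS
      obtain ⟨k, hk', hej⟩ := hposS
      refine ⟨k, by rw [← pvIdx_length nums d]; exact hk', ?_⟩
      rw [List.getD_eq_getElem _ _ hk']; exact hej
    have hr : rank.getD pos 0 = 1 + (k : Int) := by rw [← hSk]; exact hrank k hk
    have hposT : pos ∉ T := by
      intro hmemT
      have := (pvSplit_mem (pvR_asymm nums) T rest' pos pos hLpw
        (by rw [← hTL]; exact hposL)).mp hmemT
      exact pvR_asymm nums pos pos this this
    have hsplit : ∀ j : Nat, j < k →
        ((pvIdx nums d).getD j 0 ∈ T ↔ pvValj nums d j < pvValj nums d k) := by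
      intro j hj
      have hmem : (pvIdx nums d).getD j 0 ∈ T ++ pos :: rest' := by
        rw [← hTL]
        exact (mem_pvL nums d m _ hd hm).mpr (pvS_mem nums d j (by omega))
      rw [pvSplit_mem (pvR_asymm nums) T rest' pos _ hLpw hmem, ← hSk,
        pvR_S nums d j k hj hk]
    have hq : pvFenQuery fen ((k : Nat) : Int) = ∑ q ∈ Finset.Ioc 0 k, pvPts nums d T q :=
      pvFenQuery_spec hrep k (by omega)
    have haddend : 1 + pvFenQuery fen (rank.getD pos 0 - 1) = pvDpj nums d k := by
      have h1 : rank.getD pos 0 - 1 = ((k : Nat) : Int) := by rw [hr]; ring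
      rw [h1, hq, pvSumIoc]
      have h2 : ∀ j ∈ Finset.range k, pvPts nums d T (j+1)
          = (if pvValj nums d j < pvValj nums d k then pvDpj nums d j else 0) := by
        intro j hj
        rw [Finset.mem_range] at hj
        unfold pvPts
        simp only [Nat.add_sub_cancel]
        rw [if_congr (hsplit j hj) rfl rfl]
      rw [Finset.sum_congr rfl h2, ← pvDp_rec nums d k hk]
    have hrep2 := pvFenAdd_rep hrep (k+1) (by omega) (by omega) (pvDpj nums d k)
    have hcast : ((k+1 : Nat) : Int) = rank.getD pos 0 := by rw [hr]; push_cast; ring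
    rw [hcast] at hrep2
    have hrep' : pvRep (pvFenAdd fen (rank.getD pos 0) (pvDpj nums d k)) (pvN nums d)
        (pvPts nums d (T ++ [pos])) := by
      refine pvRep_congr hrep2 ?_
      intro q h1 h2
      unfold pvPts
      by_cases hqk : q = k + 1
      · subst hqk
        simp only [Nat.add_sub_cancel]
        rw [hSk]
        rw [if_neg hposT]
        simp
      · have hj : q - 1 ≠ k := by omega
        have hne : (pvIdx nums d).getD (q-1) 0 ≠ pos := by
          intro heq
          exact hj (pvS_inj nums d (q-1) k (by omega) hk (by rw [heq, hSk]))
        have hmemiff : ((pvIdx nums d).getD (q-1) 0 ∈ T ++ [pos]) ↔ ((pvIdx nums d).getD (q-1) 0 ∈ T) := by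
          rw [List.mem_append, List.mem_singleton]
          constructor
          · rintro (h | h)
            · exact h
            · exact absurd h hne
          · exact fun h => Or.inl h
        rw [if_congr hmemiff rfl rfl, if_neg hqk]
        ring
    have hTL' : pvL nums d m = (T ++ [pos]) ++ rest' := by rw [hTL]; simp
    rw [List.foldl_cons]
    have hfold := ih (T ++ [pos]) hTL' (acc + (1 + pvFenQuery fen (rank.getD pos 0 - 1)))
      (pvFenAdd fen (rank.getD pos 0) (1 + pvFenQuery fen (rank.getD pos 0 - 1)))
      (by rw [haddend]; exact hrep')
    rw [hfold, haddend]
    -- pos ∉ rest'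
    have hposR : pos ∉ rest' := by
      intro hmem
      have hpr : (pos :: rest').Pairwise (pvR nums) := (List.pairwise_append.mp hLpw).2.1
      have := (List.pairwise_cons.mp hpr).1 pos hmem
      exact pvR_asymm nums pos pos this this
    have hsum : ∑ j ∈ Finset.range (pvN nums d),
          (if (pvIdx nums d).getD j 0 ∈ pos :: rest' then pvDpj nums d j else 0)
        = pvDpj nums d k + ∑ j ∈ Finset.range (pvN nums d),
          (if (pvIdx nums d).getD j 0 ∈ rest' then pvDpj nums d j else 0) := by
      have hpt : ∀ j ∈ Finset.range (pvN nums d),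
          (if (pvIdx nums d).getD j 0 ∈ pos :: rest' then pvDpj nums d j else 0)
            = (if j = k then pvDpj nums d j else 0)
              + (if (pvIdx nums d).getD j 0 ∈ rest' then pvDpj nums d j else 0) := by
        intro j hj
        rw [Finset.mem_range] at hj
        by_cases hjk : j = k
        · subst hjk
          rw [hSk, if_pos (List.mem_cons_self), if_pos rfl, if_neg hposR]
          ring
        · have hne : (pvIdx nums d).getD j 0 ≠ pos := by
            intro heq
            exact hjk (pvS_inj nums d j k hj hk (by rw [heq, hSk]))
          rw [if_neg hjk]
          have hmemiff : ((pvIdx nums d).getD j 0 ∈ pos :: rest')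
              ↔ ((pvIdx nums d).getD j 0 ∈ rest') := by
            rw [List.mem_cons]
            constructor
            · rintro (h | h)
              · exact absurd h hne
              · exact h
            · exact fun h => Or.inr h
          rw [if_congr hmemiff rfl rfl]
          ring
      rw [Finset.sum_congr rfl hpt, Finset.sum_add_distrib,
        Finset.sum_ite_eq' (Finset.range (pvN nums d)) k (fun j => pvDpj nums d j),
        if_pos (Finset.mem_range.mpr hk)]
    rw [hsum]
    ring
-- ===== Part 5: each loop body sets f[d] to the same value =====

theorem pvRank_getD (S : List Int) (hnd : S.Nodup) (k : Nat) (hk : k < S.length) :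
    ((PySem.List.enumerate S 1).foldl (fun r p => r.insert p.2 p.1)
        PySem.Dict.empty).getD (S[k]) 0 = 1 + (k : Int) := by
  have hitems := PySem.Dict.items_foldl_insert_fresh (PySem.List.enumerate S 1)
    (fun p => p.2) (fun p => p.1) PySem.Dict.empty
    (fun a _ => PySem.Dict.contains_empty _)
    (by rw [PySem.List.map_snd_enumerate]; exact hnd)
  have hkeys : ((PySem.List.enumerate S 1).foldl (fun r p => r.insert p.2 p.1)
      PySem.Dict.empty).keys.Nodup :=
    PySem.Dict.nodup_keys_foldl_insert_key (PySem.List.enumerate S 1)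
      (fun p => p.2) (fun _ p => p.1) PySem.Dict.empty (by simp [PySem.Dict.keys_empty])
  have hmem : (S[k], 1 + (k : Int)) ∈ ((PySem.List.enumerate S 1).foldl
      (fun r p => r.insert p.2 p.1) PySem.Dict.empty).items := by
    rw [hitems]
    refine List.mem_append_right _ ?_
    refine List.mem_map.mpr ⟨(1 + (k : Int), S[k]), ?_, rfl⟩
    have hlen : k < (PySem.List.enumerate S 1).length := by
      rw [PySem.List.length_enumerate]; omega
    have := PySem.List.getElem_enumerate S 1 k hlen
    rw [← this]
    exact List.getElem_mem hlen
  exact PySem.Dict.getD_of_mem_items _ hmem hkeys 0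

theorem pvVals_eq_filter (nums : List Int) (d : Int) :
    pvVals nums d = nums.filter (fun v => decide (0 < v ∧ PySem.Int.mod v d = 0)) :=
  map_snd_filter_enumerate (fun v => decide (0 < v ∧ PySem.Int.mod v d = 0)) nums 0

theorem pvSumDp (nums : List Int) (d : Int) :
    ((pvD nums d).map (fun p => p.2)).sum
      = ∑ j ∈ Finset.range (pvN nums d), pvDpj nums d j := by
  rw [pvSum_map_getD, pvD_length]
  rfl

theorem pvStepB_val (nums : List Int) (d : Int) (f : Array Int) :
    pvStepB nums f d
      = pvASet f d (∑ j ∈ Finset.range (pvN nums d), pvDpj nums d j) := by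
  have h0 : (nums.foldl (fun st v =>
      if 0 < v ∧ PySem.Int.mod v d = 0 then
        (st.1 ++ [(v, 1 + ((st.1.filter (fun p => p.1 < v)).map (fun p => p.2)).sum)],
         st.2 + (1 + ((st.1.filter (fun p => p.1 < v)).map (fun p => p.2)).sum))
      else st) (([] : List (Int × Int)), (0 : Int)))
      = ((nums.filter (fun v => decide (0 < v ∧ PySem.Int.mod v d = 0))).foldl (fun st v =>
        (st.1 ++ [(v, 1 + ((st.1.filter (fun p => p.1 < v)).map (fun p => p.2)).sum)],
         st.2 + (1 + ((st.1.filter (fun p => p.1 < v)).map (fun p => p.2)).sum)))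
        (([] : List (Int × Int)), (0 : Int))) :=
    PySem.List.foldl_ite_eq_foldl_filter _ _ nums _
  have : pvStepB nums f d = pvASet f d (nums.foldl (fun st v =>
      if 0 < v ∧ PySem.Int.mod v d = 0 then
        (st.1 ++ [(v, 1 + ((st.1.filter (fun p => p.1 < v)).map (fun p => p.2)).sum)],
         st.2 + (1 + ((st.1.filter (fun p => p.1 < v)).map (fun p => p.2)).sum))
      else st) (([] : List (Int × Int)), (0 : Int))).2 := rfl
  rw [this, h0, ← pvVals_eq_filter, pvDp_fold (pvVals nums d) [] 0]
  simp only []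
  rw [← pvD, pvSumDp]
  norm_num
theorem pvSumDp_small (nums : List Int) (d : Int) (h : pvN nums d ≤ 1) :
    ∑ j ∈ Finset.range (pvN nums d), pvDpj nums d j = (pvN nums d : Int) := by
  rcases Nat.le_one_iff_eq_zero_or_eq_one.mp h with h0 | h1
  · rw [h0]; simp
  · rw [h1, Finset.sum_range_one, pvDp_rec nums d 0 (by omega)]
    simp

theorem pvStepA_val (nums : List Int) (d m : Int) (hd : 0 < d) (hm : ∀ x ∈ nums, x < m)
    (f : Array Int) (hf : pvAGet f d = 0) :
    pvStepA (pvLocs nums) m f d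
      = pvASet f d (∑ j ∈ Finset.range (pvN nums d), pvDpj nums d j) := by
  unfold pvStepA
  have hraw : (PySem.List.pyRange d m d).foldl
        (fun acc v => acc ++ (pvLocs nums).getD v []) []
      = pvRaw nums d m := by
    rw [PySem.List.foldl_congr_mem _ _ (fun acc v => acc ++ pvLocsv nums v) _
      (fun acc v _ => by rw [pvLocs_getD])]
    rw [PySem.List.foldl_append_eq_flatMap]
    rfl
  rw [hraw, pvSorted_raw nums d m hd hm]
  have hSlen : (pvIdx nums d).length = pvN nums d := pvIdx_length nums d
  by_cases hn : PySem.List.len (pvIdx nums d) ≤ 1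
  · rw [if_pos hn]
    rw [PySem.List.len_eq] at hn ⊢
    rw [hSlen] at hn ⊢
    rw [pvSumDp_small nums d (by exact_mod_cast hn)]
  · rw [if_neg hn]
    have hrank : ∀ k : Nat, k < pvN nums d →
        ((PySem.List.enumerate (pvIdx nums d) 1).foldl (fun r p => r.insert p.2 p.1)
          PySem.Dict.empty).getD ((pvIdx nums d).getD k 0) 0 = 1 + (k : Int) := by
      intro k hk
      have hk' : k < (pvIdx nums d).length := by omega
      rw [List.getD_eq_getElem _ _ hk']
      exact pvRank_getD (pvIdx nums d) (pvIdx_nodup nums d) k hk'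
    set rank := (PySem.List.enumerate (pvIdx nums d) 1).foldl (fun r p => r.insert p.2 p.1)
      PySem.Dict.empty with hrankdef
    have hflat : ((PySem.List.pyRange d m d).foldl (fun st v =>
        ((pvLocs nums).getD v []).reverse.foldl (fun st pos =>
          let r := rank.getD pos 0
          let addend := 1 + pvFenQuery st.2 (r - 1)
          (st.1 + addend, pvFenAdd st.2 r addend)) st)
        (pvAGet f d, List.replicate ((pvIdx nums d).length + 1) 0))
      = ((pvL nums d m).foldl (fun st pos =>
          (st.1 + (1 + pvFenQuery st.2 (rank.getD pos 0 - 1)),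
           pvFenAdd st.2 (rank.getD pos 0) (1 + pvFenQuery st.2 (rank.getD pos 0 - 1))))
        (pvAGet f d, List.replicate ((pvIdx nums d).length + 1) 0)) := by
      rw [PySem.List.foldl_congr_mem _ _ (fun st v =>
          (pvLocsv nums v).reverse.foldl (fun st pos =>
            (st.1 + (1 + pvFenQuery st.2 (rank.getD pos 0 - 1)),
             pvFenAdd st.2 (rank.getD pos 0) (1 + pvFenQuery st.2 (rank.getD pos 0 - 1)))) st) _
        (fun acc v _ => by rw [pvLocs_getD])]
      rw [pvL, List.foldl_flatMap]
    show pvASet f d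
        (((PySem.List.pyRange d m d).foldl (fun st v =>
          ((pvLocs nums).getD v []).reverse.foldl (fun st pos =>
            let r := rank.getD pos 0
            let addend := 1 + pvFenQuery st.2 (r - 1)
            (st.1 + addend, pvFenAdd st.2 r addend)) st)
          (pvAGet f d, List.replicate ((pvIdx nums d).length + 1) 0)).1)
      = _
    rw [hflat]
    have hrep0 : pvRep (List.replicate ((pvIdx nums d).length + 1) 0) (pvN nums d)
        (pvPts nums d []) := by
      rw [hSlen]
      refine pvRep_congr (pvRep_init (pvN nums d)) ?_
      intro q h1 h2
      unfold pvPts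
      rw [if_neg (List.not_mem_nil)]
    have := pvProcess nums d m hd hm rank hrank (pvL nums d m) [] (by simp)
      (pvAGet f d) _ hrep0
    rw [this, hf]
    have hone : ∀ j ∈ Finset.range (pvN nums d),
        (if (pvIdx nums d).getD j 0 ∈ pvL nums d m then pvDpj nums d j else 0)
          = pvDpj nums d j := by
      intro j hj
      rw [Finset.mem_range] at hj
      rw [if_pos ((mem_pvL nums d m _ hd hm).mpr (pvS_mem nums d j hj))]
    rw [Finset.sum_congr rfl hone]
    ring_nf
-- ===== Part 6: the outer loop over d, and the whole functions =====

theorem pvAGet_ASet_ne (f : Array Int) (d e v : Int) (hd : 0 ≤ d) (he : 0 ≤ e) (hne : d ≠ e) :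
    pvAGet (pvASet f d v) e = pvAGet f e := by
  unfold pvAGet pvASet
  rw [Array.getD_eq_getD_getElem?, Array.getD_eq_getD_getElem?, Array.getElem?_setIfInBounds,
    if_neg (by omega)]

theorem pvAGet_replicate (k : Nat) (e : Int) :
    pvAGet (Array.replicate k 0) e = 0 := by
  unfold pvAGet
  rw [Array.getD_eq_getD_getElem?, Array.getElem?_replicate]
  split <;> rfl

theorem pvFold_gen (nums : List Int) (m : Int) (hm : ∀ x ∈ nums, x < m) :
    ∀ (R : List Int), R.Pairwise (· < ·) → (∀ e ∈ R, 1 ≤ e) →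
    ∀ (f : Array Int), (∀ e ∈ R, pvAGet f e = 0) →
    R.foldl (pvStepA (pvLocs nums) m) f = R.foldl (pvStepB nums) f := by
  intro R
  induction R with
  | nil => intro _ _ f _; rfl
  | cons d R' ih =>
    intro hpw hpos f hf
    rw [List.foldl_cons, List.foldl_cons]
    have hd : 0 < d := by have := hpos d (List.mem_cons_self); omega
    have hstep : pvStepA (pvLocs nums) m f d = pvStepB nums f d := by
      rw [pvStepA_val nums d m hd hm f (hf d (List.mem_cons_self)), pvStepB_val]
    rw [hstep, pvStepB_val]
    refine ih (List.pairwise_cons.mp hpw).2 (fun e he => hpos e (List.mem_cons_of_mem d he)) _ ?_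
    intro e he
    have hde : d < e := (List.pairwise_cons.mp hpw).1 e he
    have he1 : 1 ≤ e := hpos e (List.mem_cons_of_mem d he)
    rw [pvAGet_ASet_ne f d e _ (by omega) (by omega) (by omega)]
    exact hf e (List.mem_cons_of_mem d he)
  
theorem pvTotal_eq (nums : List Int) : totalBeauty nums = totalBeauty_alt nums := by
  unfold totalBeauty totalBeauty_alt
  cases hmax : PySem.List.max? nums (fun x => x) with
  | none => rfl
  | some mx =>
    have hm : ∀ x ∈ nums, x < mx + 1 := by
      intro x hx
      have := PySem.List.max?_isMax hmax x hx
      omega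
    have hfold : (PySem.List.pyRange 1 (mx+1) 1).foldl (pvStepA (pvLocs nums) (mx+1))
          (Array.replicate (mx+1).toNat 0)
        = (PySem.List.pyRange 1 (mx+1) 1).foldl (pvStepB nums) (Array.replicate (mx+1).toNat 0) := by
      refine pvFold_gen nums (mx+1) hm _ ?_ ?_ _ ?_
      · exact PySem.List.pairwise_lt_pyRange_one 1 (mx+1)
      · intro e he
        rw [PySem.List.mem_pyRange_one] at he
        omega
      · intro e he
        rw [PySem.List.mem_pyRange_one] at he
        exact pvAGet_replicate _ e
    show pvWeightedSum (mx+1) (pvMoebius (mx+1) ((PySem.List.pyRange 1 (mx+1) 1).foldl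
        (pvStepA (pvLocs nums) (mx+1)) (Array.replicate (mx+1).toNat 0)))
      = pvWeightedSum (mx+1) (pvMoebius (mx+1) ((PySem.List.pyRange 1 (mx+1) 1).foldl
        (pvStepB nums) (Array.replicate (mx+1).toNat 0)))
    rw [hfold]

-- ===== VERDICT (by name: the statement is the Claim_ definition above) =====
theorem totalBeauty_spec : Claim_equal_totalBeauty := by
  intro nums _ _
  unfold Spec_totalBeauty
  exact pvTotal_eq nums
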